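-- pv_equiv track=rewrite | github.com/WantKakao/problemSolving | 백준/Silver/1564. 팩토리얼5/팩토리얼5.py | solve
-- ===== SOURCE A (Python) =====
-- def solve(n):
--     MOD = 100000  # 마지막 5자리
--
--     ans = 1
--     cnt2 = 0
--     cnt5 = 0
--
--     for i in range(2, n+1):
--         x = i
--
--         # 2 제거
--         while x % 2 == 0:
--             x //= 2
--             cnt2 += 1
--
--         # 5 제거
--         while x % 5 == 0:
--             x //= 5
--             cnt5 += 1
--
--         ans = (ans * x) % MOD
--
--     # 남은 2 처리
--     for _ in range(cnt2 - cnt5):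
--         ans = (ans * 2) % MOD
--
--     return str(ans).zfill(5)
-- ===== SOURCE B (Python) =====
-- def solve(n):
--     MOD = 100000
--
--     def strip(x):
--         # remove all factors 2 and 5
--         if x % 2 == 0:
--             return strip(x // 2)
--         if x % 5 == 0:
--             return strip(x // 5)
--         return x
--
--     def legendre(m, p):
--         # number of factors p in m! (Legendre's formula)
--         total = 0
--         q = p
--         while q <= m:
--             total += m // q
--             q *= p
--         return total
--
--     ans = 1
--     for i in range(2, n + 1):
--         ans = ans * strip(i) % MOD
--
--     e = legendre(n, 2) - legendre(n, 5)
--     return str(ans * pow(2, e, MOD) % MOD).zfill(5)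
-- ===== Notes on version B (the rewrite author's own statement) =====
-- stated objective: alternative
-- what changed: B drops A's per-number counting of 2s and 5s: the exponent of the leftover 2s is computed in closed form by Legendre's formula (sum of n//p^k) and applied with one modular pow instead of A's multiply-by-2 loop; the stripped values themselves come from a single recursive strip helper instead of two sequential while loops.
import Mathlib
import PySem

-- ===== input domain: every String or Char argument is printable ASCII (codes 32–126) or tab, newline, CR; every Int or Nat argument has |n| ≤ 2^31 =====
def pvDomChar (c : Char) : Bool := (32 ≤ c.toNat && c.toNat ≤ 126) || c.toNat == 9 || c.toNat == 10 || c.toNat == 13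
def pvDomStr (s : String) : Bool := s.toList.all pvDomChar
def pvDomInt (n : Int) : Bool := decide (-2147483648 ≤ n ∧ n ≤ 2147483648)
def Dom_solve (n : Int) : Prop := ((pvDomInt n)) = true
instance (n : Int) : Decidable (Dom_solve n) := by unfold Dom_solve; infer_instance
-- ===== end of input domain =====

-- B replaces A's per-number counting of factors 2 and 5 by Legendre's closed-form factorial
-- valuations plus one modular power; objective: alternative algorithm (no speed claim).


-- ===== PORT A =====
-- 'while x % p == 0: x //= p; cnt += 1' for p = 2, 5; the '0 < x ∧ 2 ≤ p' part of the
-- guard is a totality guard only (in A, x starts at i ≥ 2 and p is the literal 2 or 5).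
def stripA (p : Nat) (x : Nat) (cnt : Int) : Nat × Int :=
  if h : 2 ≤ p ∧ 0 < x ∧ x % p = 0 then stripA p (x / p) (cnt + 1) else (x, cnt)
  termination_by x
  decreasing_by exact Nat.div_lt_self h.2.1 (by omega)

-- loop body of A's main 'for i in range(2, n+1)'; i ≥ 2 there, so i.toNat is exact
def stepA (s : Int × Int × Int) (i : Int) : Int × Int × Int :=
  let r2 := stripA 2 i.toNat s.2.1
  let r5 := stripA 5 r2.1 s.2.2
  (s.1 * (r5.1 : Int) % 100000, r2.2, r5.2)

-- Python '%' with the positive literal modulus 100000 coincides with Int.emod, used below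
def solve (n : Int) : String :=
  let s := (PySem.List.pyRange 2 (n+1) 1).foldl stepA (1, 0, 0)
  let ans := (PySem.List.pyRange 0 (s.2.1 - s.2.2) 1).foldl (fun a _ => a * 2 % 100000) s.1
  PySem.Str.zfill (PySem.Int.toStr ans) 5

-- ===== PORT B =====
-- Source B's recursive strip; '0 < x' is a totality guard only (callers pass x ≥ 2)
def stripB (x : Nat) : Nat :=
  if h : 0 < x ∧ x % 2 = 0 then stripB (x / 2)
  else if h : 0 < x ∧ x % 5 = 0 then stripB (x / 5)
  else x
  termination_by x
  decreasing_by
  · exact Nat.div_lt_self h.1 (by omega)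
  · exact Nat.div_lt_self h.1 (by omega)

-- Source B's 'while q <= m: total += m // q; q *= p'; '2 ≤ p ∧ 1 ≤ q' is a totality guard only
def legAux (m : Int) (p q : Nat) (total : Int) : Int :=
  if h : 2 ≤ p ∧ 1 ≤ q ∧ (q : Int) ≤ m then legAux m p (q * p) (total + PySem.Int.floordiv m q)
  else total
  termination_by m.toNat + 1 - q
  decreasing_by
    have h2 : q * 2 ≤ q * p := Nat.mul_le_mul_left q h.1
    have h3 : q ≤ m.toNat := by omega
    omega

def legB (m : Int) (p : Nat) : Int := legAux m p p 0

def stepB (a i : Int) : Int := a * (stripB i.toNat : Int) % 100000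

-- Python 'pow(2, e, 100000)' (e ≥ 0 always holds here) is ported as 2 ^ e.toNat % 100000
def solve_alt (n : Int) : String :=
  let ans := (PySem.List.pyRange 2 (n+1) 1).foldl stepB 1
  let e := legB n 2 - legB n 5
  PySem.Str.zfill (PySem.Int.toStr (ans * ((2:Int) ^ e.toNat % 100000) % 100000)) 5

-- ===== PRECONDITION & SPEC =====
def Spec_solve (n : Int) (out : String) : Prop := out = solve_alt n
instance (n : Int) (out : String) : Decidable (Spec_solve n out) := by unfold Spec_solve; infer_instance

-- ===== CLAIM (what is proved, stated in full; the proofs are below) =====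
def Claim_equal_solve : Prop := ∀ (n : Int), Dom_solve n → Spec_solve n (solve n)

-- ===== LEMMAS AND PROOFS =====

lemma stripA_eq (p : Nat) (hp : p.Prime) :
    ∀ x, 0 < x → ∀ c, stripA p x c = (x / p ^ x.factorization p, c + (x.factorization p : Int)) := by
  intro x
  induction x using Nat.strong_induction_on with
  | _ x ih =>
    intro hx c
    rw [stripA]
    by_cases hd : x % p = 0
    · rw [dif_pos ⟨hp.two_le, hx, hd⟩]
      have hdvd : p ∣ x := Nat.dvd_of_mod_eq_zero hd
      have hxp : 0 < x / p := Nat.div_pos (Nat.le_of_dvd hx hdvd) hp.pos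
      have hlt : x / p < x := Nat.div_lt_self hx hp.one_lt
      rw [ih _ hlt hxp]
      have hxeq : x = p * (x / p) := (Nat.mul_div_cancel' hdvd).symm
      have hfac : x.factorization p = (x / p).factorization p + 1 := by
        conv_lhs => rw [hxeq]
        rw [Nat.factorization_mul hp.pos.ne' hxp.ne', Finsupp.add_apply,
          Nat.Prime.factorization_self hp]
        omega
      have hval : x / p ^ x.factorization p = (x / p) / p ^ (x / p).factorization p := by
        rw [hfac, pow_succ, mul_comm, ← Nat.div_div_eq_div_mul]
      rw [hval, hfac]
      push_cast
      ring_nf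
    · rw [dif_neg (fun hc => hd hc.2.2)]
      have hnd : ¬ p ∣ x := by
        intro hdvd
        exact hd (Nat.mod_eq_zero_of_dvd hdvd)
      have h0 : x.factorization p = 0 := Nat.factorization_eq_zero_of_not_dvd hnd
      simp [h0]

lemma ocompl_div (p x : Nat) (hp : p.Prime) (hx : 0 < x) (hd : p ∣ x) :
    x / p ^ x.factorization p = (x / p) / p ^ (x / p).factorization p := by
  have hxp : 0 < x / p := Nat.div_pos (Nat.le_of_dvd hx hd) hp.pos
  have hfac : x.factorization p = (x / p).factorization p + 1 := by
    conv_lhs => rw [(Nat.mul_div_cancel' hd).symm]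
    rw [Nat.factorization_mul hp.pos.ne' hxp.ne', Finsupp.add_apply,
      Nat.Prime.factorization_self hp]
    omega
  rw [hfac, pow_succ, mul_comm, ← Nat.div_div_eq_div_mul]

lemma ocompl_of_not_dvd (p x : Nat) (hd : ¬ p ∣ x) :
    x / p ^ x.factorization p = x := by
  rw [Nat.factorization_eq_zero_of_not_dvd hd, pow_zero, Nat.div_one]

lemma stripB_eq : ∀ x, 0 < x →
    stripB x = (x / 2 ^ x.factorization 2) / 5 ^ (x / 2 ^ x.factorization 2).factorization 5 := by
  intro x
  induction x using Nat.strong_induction_on with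
  | _ x ih =>
    intro hx
    rw [stripB]
    by_cases h2 : x % 2 = 0
    · have hd2 : (2:Nat) ∣ x := Nat.dvd_of_mod_eq_zero h2
      rw [dif_pos ⟨hx, h2⟩, ih _ (Nat.div_lt_self hx (by omega))
        (Nat.div_pos (Nat.le_of_dvd hx hd2) (by omega)),
        ← ocompl_div 2 x Nat.prime_two hx hd2]
    · rw [dif_neg (fun hc => h2 hc.2)]
      have hnd2 : ¬ (2:Nat) ∣ x := fun hdvd => h2 (Nat.mod_eq_zero_of_dvd hdvd)
      by_cases h5 : x % 5 = 0
      · have hd5 : (5:Nat) ∣ x := Nat.dvd_of_mod_eq_zero h5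
        have hx5 : 0 < x / 5 := Nat.div_pos (Nat.le_of_dvd hx hd5) (by omega)
        have hnd2' : ¬ (2:Nat) ∣ x / 5 := fun hdvd =>
          hnd2 (hdvd.trans (Nat.div_dvd_of_dvd hd5))
        rw [dif_pos ⟨hx, h5⟩, ih _ (Nat.div_lt_self hx (by omega)) hx5,
          ocompl_of_not_dvd 2 x hnd2, ocompl_of_not_dvd 2 (x/5) hnd2',
          ← ocompl_div 5 x (by norm_num) hx hd5]
      · rw [dif_neg (fun hc => h5 hc.2)]
        have hnd5 : ¬ (5:Nat) ∣ x := fun hdvd => h5 (Nat.mod_eq_zero_of_dvd hdvd)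
        rw [ocompl_of_not_dvd 2 x hnd2, ocompl_of_not_dvd 5 x hnd5]

lemma legAux_spec (p : Nat) (hp : 2 ≤ p) (m : Int) :
    ∀ fuel j t, 1 ≤ j → m.toNat + 1 - j ≤ fuel →
      legAux m p (p ^ j) t
        = t + ((∑ i ∈ Finset.Ico j (m.toNat + 1), m.toNat / p ^ i : Nat) : Int) := by
  intro fuel
  induction fuel with
  | zero =>
    intro j t hj hf
    have hjlt : j < p ^ j := Nat.lt_pow_self (by omega)
    rw [legAux, dif_neg, Finset.Ico_eq_empty (by omega), Finset.sum_empty]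
    · simp
    · rintro ⟨-, -, hle⟩
      have : m ≤ (m.toNat : Int) := Int.self_le_toNat m
      have : (m.toNat : Int) < ((p ^ j : Nat) : Int) := by exact_mod_cast (show m.toNat < p ^ j by omega)
      omega
  | succ fuel ihf =>
    intro j t hj hf
    have hjlt : j < p ^ j := Nat.lt_pow_self (by omega)
    rw [legAux]
    by_cases hg : ((p ^ j : Nat) : Int) ≤ m
    · have hm0 : (0:Int) ≤ m := le_trans (by positivity) hg
      have hpj : (p:Int) ^ j ≤ m := by push_cast at hg ⊢; exact hg
      have hqm : p ^ j ≤ m.toNat := by omega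
      rw [dif_pos ⟨hp, Nat.one_le_pow _ _ (by omega), hg⟩, ← pow_succ,
        ihf (j+1) _ (by omega) (by omega)]
      have hjm : j < m.toNat + 1 := by omega
      have hflo : PySem.Int.floordiv m ((p ^ j : Nat) : Int) = ((m.toNat / p ^ j : Nat) : Int) := by
        conv_lhs => rw [← Int.toNat_of_nonneg hm0]
        exact PySem.Int.floordiv_natCast _ _
      rw [Finset.sum_eq_sum_Ico_succ_bot hjm, hflo]
      push_cast
      ring
    · rw [dif_neg (fun hc => hg hc.2.2)]
      have hz : ∀ i ∈ Finset.Ico j (m.toNat + 1), m.toNat / p ^ i = 0 := by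
        intro i hi
        rcases Finset.mem_Ico.mp hi with ⟨h1, _⟩
        have h4 : m.toNat < p ^ j := by omega
        exact Nat.div_eq_of_lt (lt_of_lt_of_le h4 (Nat.pow_le_pow_right (by omega) h1))
      rw [Finset.sum_eq_zero hz]
      simp

lemma legB_eq (p : Nat) (hp : p.Prime) (m : Int) :
    legB m p = ((Nat.factorial m.toNat).factorization p : Int) := by
  have h := legAux_spec p hp.two_le m m.toNat 1 0 le_rfl (by omega)
  rw [pow_one] at h
  rw [legB, h, Nat.factorization_factorial hp (b := m.toNat + 1)
    (lt_of_le_of_lt (Nat.log_le_self p m.toNat) (Nat.lt_succ_self _))]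
  simp

lemma loop_inv (m : Nat) :
    (PySem.List.pyRange 2 ((m : Int) + 1) 1).foldl stepA (1, 0, 0)
      = ((PySem.List.pyRange 2 ((m : Int) + 1) 1).foldl stepB 1,
         ((Nat.factorial m).factorization 2 : Int), ((Nat.factorial m).factorization 5 : Int)) := by
  induction m with
  | zero =>
    rw [PySem.List.pyRange_one_eq_nil (by norm_num)]
    simp [Nat.factorial]
  | succ m ih =>
    rcases Nat.eq_zero_or_pos m with rfl | hm
    · rw [PySem.List.pyRange_one_eq_nil (by norm_num)]
      simp [Nat.factorial]
    · have hcast : ((m + 1 : Nat) : Int) + 1 = ((m : Int) + 1) + 1 := by push_cast; ring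
      have hsplit : PySem.List.pyRange 2 (((m + 1 : Nat) : Int) + 1) 1
          = PySem.List.pyRange 2 ((m : Int) + 1) 1 ++ [(m : Int) + 1] := by
        rw [hcast, PySem.List.pyRange_one_succ_right (by omega)]
      rw [hsplit, List.foldl_append, List.foldl_append, ih]
      have hto : ((m : Int) + 1).toNat = m + 1 := by omega
      have hpos : 0 < m + 1 := Nat.succ_pos m
      have hocpos : 0 < (m + 1) / 2 ^ (m + 1).factorization 2 :=
        Nat.ordCompl_pos 2 hpos.ne'
      simp only [List.foldl, stepA, stepB, hto,
        stripA_eq 2 Nat.prime_two (m + 1) hpos,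
        stripA_eq 5 (by norm_num) _ hocpos,
        stripB_eq (m + 1) hpos]
      have hfacmul : ∀ p : Nat, (Nat.factorial (m + 1)).factorization p
          = (m + 1).factorization p + (Nat.factorial m).factorization p := by
        intro p
        rw [Nat.factorial_succ, Nat.factorization_mul (Nat.succ_ne_zero m)
          (Nat.factorial_ne_zero m), Finsupp.add_apply]
      have herase : ((m + 1) / 2 ^ (m + 1).factorization 2).factorization 5
          = (m + 1).factorization 5 := by
        rw [Nat.factorization_ordCompl (m + 1) 2]
        exact Finsupp.erase_ne (by norm_num)
      refine Prod.ext rfl (Prod.ext ?_ ?_) <;> simp [hfacmul, herase] <;> push_cast <;> ring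

lemma fold2 : ∀ (k : Nat) (a : Int),
    (List.range k).foldl (fun a _ => a * 2 % 100000) a
      = if k = 0 then a else a * 2 ^ k % 100000 := by
  intro k
  induction k with
  | zero => simp
  | succ k ih =>
    intro a
    rw [List.range_succ, List.foldl_append, ih]
    have hstep : a * 2 ^ (k + 1) % 100000 = (a * 2 ^ k % 100000) * 2 % 100000 := by
      rw [pow_succ, ← mul_assoc, Int.mul_emod (a * 2 ^ k) 2]
      norm_num
    rcases Nat.eq_zero_or_pos k with rfl | hk
    · simp [List.foldl]
    · rw [if_neg hk.ne', if_neg (Nat.succ_ne_zero k)]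
      simp [List.foldl, hstep]

lemma foldB_mod (xs : List Int) (a i : Int) :
    (List.foldl stepB a (xs ++ [i])) % 100000 = List.foldl stepB a (xs ++ [i]) := by
  simp [List.foldl_append, stepB, Int.emod_emod_of_dvd]

lemma main_eq (n : Int) : solve n = solve_alt n := by
  by_cases hn : n + 1 ≤ 2
  · have h1 : PySem.List.pyRange 2 (n + 1) 1 = [] := PySem.List.pyRange_one_eq_nil hn
    have h2 : legB n 2 = 0 := by
      rw [legB, legAux, dif_neg]
      rintro ⟨-, -, h⟩
      norm_num at h
      omega
    have h5 : legB n 5 = 0 := by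
      rw [legB, legAux, dif_neg]
      rintro ⟨-, -, h⟩
      norm_num at h
      omega
    rw [solve, solve_alt, h1, h2, h5]
    norm_num [PySem.List.pyRange_one_eq_nil (le_refl (0 : Int))]
  · have hm : n = (n.toNat : Int) := (Int.toNat_of_nonneg (by omega)).symm
    have hm2 : 2 ≤ n.toNat := by omega
    rw [solve, solve_alt, hm, loop_inv n.toNat,
      legB_eq 2 Nat.prime_two, legB_eq 5 (by norm_num)]
    simp only [Int.toNat_natCast]
    set B := (PySem.List.pyRange 2 ((n.toNat : Int) + 1) 1).foldl stepB 1 with hB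
    set e : Int := ((Nat.factorial n.toNat).factorization 2 : Int)
      - ((Nat.factorial n.toNat).factorization 5 : Int) with he
    have hBmod : B % 100000 = B := by
      have hsp : PySem.List.pyRange 2 ((n.toNat : Int) + 1) 1
          = PySem.List.pyRange 2 (n.toNat : Int) 1 ++ [(n.toNat : Int)] :=
        PySem.List.pyRange_one_succ_right (by exact_mod_cast hm2)
      rw [hB, hsp]
      exact foldB_mod _ _ _
    have hfold : (PySem.List.pyRange 0 e 1).foldl (fun a _ => a * 2 % 100000) B
        = if e.toNat = 0 then B else B * 2 ^ e.toNat % 100000 := by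
      rw [PySem.List.pyRange_one, List.foldl_map, ← fold2]
      norm_num
    rw [hfold]
    have hpow : B * ((2 : Int) ^ e.toNat % 100000) % 100000 = B * 2 ^ e.toNat % 100000 := by
      rw [Int.mul_emod, Int.emod_emod_of_dvd _ dvd_rfl, ← Int.mul_emod]
    rw [hpow]
    rcases Nat.eq_zero_or_pos e.toNat with hz | hpos
    · rw [if_pos hz, hz]
      norm_num [hBmod]
    · rw [if_neg hpos.ne']

-- ===== VERDICT (by name: the statement is the Claim_ definition above) =====
theorem solve_spec : Claim_equal_solve := by
  intro n _
  unfold Spec_solve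
  exact main_eq n
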